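-- pv_equiv track=rewrite | github.com/BARKTEGH/dataset | sem2tacred/feature.py | get_entity_position
-- ===== SOURCE A (Python) =====
-- def get_entity_position(entity1, entity2, words):
--     entity1__list = entity1.split()
--     entity2__list = entity2.split()
--     entity1_before = 0
--     entity1_back = 0
--     entity2_before = 1
--     entity2_back = 1
--
--     for i, word in enumerate(words):
--         if entity1__list[0] == word:
--             index = 1
--             while index < len(entity1__list) and (index+i) < len(words):
--                 if words[i+index] == entity1__list[index]:
--                     index += 1
--                 else:
--                     break
--             if index == len(entity1__list):
--                 entity1_before = i
--                 entity1_back = i+index-1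
--         if entity2__list[0] == word:
--             index = 1
--             while index < len(entity2__list) and (index + i) < len(words):
--                 if words[i + index] == entity2__list[index]:
--                     index += 1
--                 else:
--                     break
--             if index == len(entity2__list):
--                 entity2_before = i
--                 entity2_back = i + index - 1
--
--     return entity1_before, entity1_back, entity2_before, entity2_back
-- ===== SOURCE B (Python) =====
-- def _find_last(elist, words):
--     """Last start index of elist as a contiguous run in words, scanning back-to-front (early exit)."""
--     if not elist:
--         return None
--     start = len(words) - len(elist)
--     while start >= 0:
--         if words[start:start + len(elist)] == elist:
--             return start
--         start -= 1
--     return None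
--
--
-- def get_entity_position(entity1, entity2, words):
--     l1 = entity1.split()
--     l2 = entity2.split()
--     i1 = _find_last(l1, words)
--     i2 = _find_last(l2, words)
--     e1 = (i1, i1 + len(l1) - 1) if i1 is not None else (0, 0)
--     e2 = (i2, i2 + len(l2) - 1) if i2 is not None else (1, 1)
--     return e1 + e2
-- ===== Notes on version B (the rewrite author's own statement) =====
-- stated objective: alternative
-- what changed: A scans words left-to-right, restarting a verification at every word whose first token matches and overwriting the stored positions with each later full match; B searches back-to-front per entity with a slice comparison and stops at the first (i.e. last) occurrence, so defaults fall out naturally instead of being overwritten loop state.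
import Mathlib
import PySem

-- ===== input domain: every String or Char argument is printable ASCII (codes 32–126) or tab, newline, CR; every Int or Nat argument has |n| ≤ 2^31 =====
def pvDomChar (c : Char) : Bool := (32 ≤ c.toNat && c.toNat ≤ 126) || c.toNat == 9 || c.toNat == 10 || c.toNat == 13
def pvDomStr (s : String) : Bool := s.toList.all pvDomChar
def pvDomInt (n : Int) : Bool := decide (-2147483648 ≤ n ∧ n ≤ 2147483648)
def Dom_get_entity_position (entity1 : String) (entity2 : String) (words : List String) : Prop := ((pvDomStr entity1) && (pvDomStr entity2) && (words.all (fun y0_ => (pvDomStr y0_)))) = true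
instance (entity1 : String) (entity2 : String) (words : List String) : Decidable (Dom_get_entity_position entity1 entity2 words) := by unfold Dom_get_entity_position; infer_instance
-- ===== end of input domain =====

-- B replaces A's forward scan-all-matches (restart at every word, keep overwriting with the latest
-- full match) by a back-to-front scan per entity that stops at the FIRST match found, i.e. the last
-- occurrence; objective: alternative traversal with early exit (same worst-case cost).

-- ===== PORT A =====
-- the inner `while index < len(...) and (index+i) < len(words): if words[i+index]==...[index]: index += 1 else: break`
def whileA (el ws : List String) (i : Int) (index : Nat) : Nat :=
  if h : index < el.length ∧ (index : Int) + i < (ws.length : Int) then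
    if PySem.List.pyGet? ws (i + (index : Int)) = PySem.List.pyGet? el (index : Int) then
      whileA el ws i (index + 1)
    else index
  else index
termination_by el.length - index
decreasing_by omega

def get_entity_position (entity1 : String) (entity2 : String) (words : List String) : List Int :=
  let entity1_list := PySem.Str.split₀ entity1
  let entity2_list := PySem.Str.split₀ entity2
  -- state = ((entity1_before, entity1_back), (entity2_before, entity2_back)), initially ((0,0),(1,1))
  let r := (PySem.List.enumerate words).foldl
    (fun (st : (Int × Int) × (Int × Int)) (iw : Int × String) =>
      (if PySem.List.pyGet? entity1_list 0 = some iw.2 then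
         (let index := whileA entity1_list words iw.1 1
          if index = entity1_list.length then (iw.1, iw.1 + (index : Int) - 1) else st.1)
       else st.1,
       if PySem.List.pyGet? entity2_list 0 = some iw.2 then
         (let index := whileA entity2_list words iw.1 1
          if index = entity2_list.length then (iw.1, iw.1 + (index : Int) - 1) else st.2)
       else st.2))
    ((0, 0), (1, 1))
  [r.1.1, r.1.2, r.2.1, r.2.2]

-- ===== PORT B =====
-- the `while start >= 0: if words[start:start+len(elist)] == elist: return start; start -= 1`,
-- as a count-down over the start+1 remaining candidates
def goB (el ws : List String) : Nat → Option Nat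
  | 0 => none
  | k + 1 =>
      if PySem.List.slice ws (some (k : Int)) (some ((k : Int) + (el.length : Int))) = el then some k
      else goB el ws k

def findLast (el ws : List String) : Option Nat :=
  if el.isEmpty then none
  else goB el ws (ws.length + 1 - el.length)

def get_entity_position_alt (entity1 : String) (entity2 : String) (words : List String) : List Int :=
  let l1 := PySem.Str.split₀ entity1
  let l2 := PySem.Str.split₀ entity2
  let e1 : Int × Int :=
    match findLast l1 words with
    | some s => ((s : Int), (s : Int) + (l1.length : Int) - 1)
    | none => (0, 0)
  let e2 : Int × Int :=
    match findLast l2 words with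
    | some s => ((s : Int), (s : Int) + (l2.length : Int) - 1)
    | none => (1, 1)
  [e1.1, e1.2, e2.1, e2.2]

-- ===== PRECONDITION & SPEC =====
-- Pre_ excludes exactly the inputs where A raises IndexError: a nonempty words list together with an
-- entity that splits to no words (entityN__list[0] is evaluated for every word).
def Pre_get_entity_position (entity1 : String) (entity2 : String) (words : List String) : Prop :=
  words = [] ∨ (PySem.Str.split₀ entity1 ≠ [] ∧ PySem.Str.split₀ entity2 ≠ [])
instance (entity1 : String) (entity2 : String) (words : List String) : Decidable (Pre_get_entity_position entity1 entity2 words) := by unfold Pre_get_entity_position; infer_instance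

def pvWitness_get_entity_position : String × String × List String := ("b c", "x", ["a", "b", "c", "b", "c"])

def Spec_get_entity_position (entity1 : String) (entity2 : String) (words : List String) (out : List Int) : Prop := out = get_entity_position_alt entity1 entity2 words
instance (entity1 : String) (entity2 : String) (words : List String) (out : List Int) : Decidable (Spec_get_entity_position entity1 entity2 words out) := by unfold Spec_get_entity_position; infer_instance

-- ===== CLAIM (what is proved, stated in full; the proofs are below) =====
def Claim_equal_get_entity_position : Prop := ∀ (entity1 : String) (entity2 : String) (words : List String), Dom_get_entity_position entity1 entity2 words → Pre_get_entity_position entity1 entity2 words → Spec_get_entity_position entity1 entity2 words (get_entity_position entity1 entity2 words)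

-- ===== LEMMAS AND PROOFS =====

-- A's per-entity step, and its abstract form (keep the latest full match at position iw.1)
def stepE (el ws : List String) (st : Int × Int) (iw : Int × String) : Int × Int :=
  if PySem.List.pyGet? el 0 = some iw.2 then
    (let index := whileA el ws iw.1 1
     if index = el.length then (iw.1, iw.1 + (index : Int) - 1) else st)
  else st

def stepP (el ws : List String) (st : Int × Int) (iw : Int × String) : Int × Int :=
  if el <+: ws.drop iw.1.toNat then (iw.1, iw.1 + (el.length : Int) - 1) else st

-- last s < k with a full match of el at s
def lastHit (el ws : List String) : Nat → Option Nat
  | 0 => none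
  | k + 1 => if el <+: ws.drop k then some k else lastHit el ws k

theorem whileA_spec (el ws : List String) (k : Nat) :
    ∀ n idx, idx ≤ el.length → el.length - idx = n →
      (whileA el ws (k : Int) idx = el.length ↔ el.drop idx <+: ws.drop (k + idx)) := by
  intro n
  induction n with
  | zero =>
    intro idx h1 h2
    have hidx : idx = el.length := by omega
    rw [whileA]
    simp [hidx, List.drop_length]
  | succ n ih =>
    intro idx h1 h2
    have hlt : idx < el.length := by omega
    rw [whileA]
    by_cases h2' : (idx : Int) + (k : Int) < (ws.length : Int)
    · have hwlt : k + idx < ws.length := by omega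
      have hcast : (k : Int) + (idx : Int) = ((k + idx : Nat) : Int) := by push_cast; ring
      rw [dif_pos ⟨hlt, h2'⟩, hcast, PySem.List.pyGet?_natCast, PySem.List.pyGet?_natCast]
      have hcond : (ws[k + idx]? = el[idx]?) ↔ (ws[k + idx] = el[idx]) := by
        rw [List.getElem?_eq_getElem hwlt, List.getElem?_eq_getElem hlt]
        simp
      by_cases heq : ws[k + idx] = el[idx]
      · rw [if_pos (hcond.2 heq), ih (idx + 1) (by omega) (by omega),
            show k + (idx + 1) = (k + idx) + 1 from by omega,
            show List.drop idx el = el[idx] :: List.drop (idx + 1) el from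
              List.drop_eq_getElem_cons hlt,
            show List.drop (k + idx) ws = ws[k + idx] :: List.drop (k + idx + 1) ws from
              List.drop_eq_getElem_cons hwlt,
            List.cons_prefix_cons]
        simp [heq]
      · rw [if_neg (fun h => heq (hcond.1 h))]
        constructor
        · intro h; omega
        · intro h
          rw [List.drop_eq_getElem_cons hlt, List.drop_eq_getElem_cons hwlt,
              List.cons_prefix_cons] at h
          exact absurd h.1.symm heq
    · rw [dif_neg (by intro h; exact h2' h.2)]
      constructor
      · intro h; omega
      · intro h
        have hnil : ws.drop (k + idx) = [] := List.drop_eq_nil_of_le (by omega)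
        rw [hnil, List.prefix_nil] at h
        have hcons := List.drop_eq_getElem_cons hlt (l := el)
        rw [h] at hcons
        exact absurd hcons.symm (List.cons_ne_nil _ _)

theorem cond_iff (el ws : List String) (hel : el ≠ []) (k : Nat) (hk : k < ws.length) :
    ((PySem.List.pyGet? el 0 = some ws[k]) ∧ whileA el ws (k : Int) 1 = el.length) ↔
      el <+: ws.drop k := by
  have h0 : 0 < el.length := List.length_pos_of_ne_nil hel
  have hget : PySem.List.pyGet? el 0 = el[0]? := by
    have := PySem.List.pyGet?_natCast el 0
    simpa using this
  rw [hget, whileA_spec el ws k (el.length - 1) 1 (by omega) rfl]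
  rw [List.drop_eq_getElem_cons hk]
  conv_rhs => rw [show el = el[0] :: el.drop 1 by
    have := List.drop_eq_getElem_cons h0
    simpa using this]
  rw [List.cons_prefix_cons]
  simp [List.getElem?_eq_getElem h0]

theorem stepE_eq_stepP (el ws : List String) (hel : el ≠ []) (st : Int × Int)
    (iw : Int × String) (hmem : iw ∈ PySem.List.enumerate ws) :
    stepE el ws st iw = stepP el ws st iw := by
  rcases (PySem.List.mem_enumerate_iff ws 0 iw).1 hmem with ⟨k, hk, hp⟩
  subst hp
  simp only [zero_add]
  have hiff := cond_iff el ws hel k hk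
  unfold stepE stepP
  simp only [Int.toNat_natCast]
  by_cases hpre : el <+: ws.drop k
  · have hc := hiff.2 hpre
    simp [hc.1, hc.2, hpre]
  · rw [if_neg hpre]
    by_cases hc1 : PySem.List.pyGet? el 0 = some ws[k]
    · rw [if_pos hc1]
      exact if_neg (fun hc2 => hpre (hiff.1 ⟨hc1, hc2⟩))
    · rw [if_neg hc1]

theorem foldl_pair {α : Type} (f g : (Int × Int) → α → (Int × Int)) :
    ∀ (L : List α) (ab : (Int × Int) × (Int × Int)),
      L.foldl (fun st x => (f st.1 x, g st.2 x)) ab = (L.foldl f ab.1, L.foldl g ab.2) := by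
  intro L
  induction L with
  | nil => intro ab; rfl
  | cons x xs ih => intro ab; simp [List.foldl_cons, ih]

theorem foldl_stepP_range (el ws : List String) (d : Int × Int) :
    ∀ n : Nat,
      (PySem.List.pyRange 0 (n : Int)).foldl
          (fun st (j : Int) =>
            if el <+: ws.drop j.toNat then (j, j + (el.length : Int) - 1) else st) d =
        (match lastHit el ws n with
         | some s => ((s : Int), (s : Int) + (el.length : Int) - 1)
         | none => d) := by
  intro n
  induction n with
  | zero => simp [PySem.List.pyRange, lastHit]
  | succ n ih =>
    have hn : ((n + 1 : Nat) : Int) = (n : Int) + 1 := by push_cast; ring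
    rw [hn, PySem.List.pyRange_one_succ_right (by positivity), List.foldl_append]
    simp only [List.foldl_cons, List.foldl_nil, lastHit, Int.toNat_natCast]
    by_cases hp : el <+: ws.drop n
    · rw [if_pos hp, if_pos hp]
    · rw [if_neg hp, if_neg hp, ih]

theorem foldl_stepE (el ws : List String) (hel : el ≠ []) (d : Int × Int) :
    (PySem.List.enumerate ws).foldl (stepE el ws) d =
      (match lastHit el ws ws.length with
       | some s => ((s : Int), (s : Int) + (el.length : Int) - 1)
       | none => d) := by
  rw [PySem.List.foldl_congr_mem _ _ (stepP el ws) d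
        (fun st iw hm => stepE_eq_stepP el ws hel st iw hm)]
  rw [PySem.List.enumerate_eq_map_pyRange ws ""]
  rw [List.foldl_map]
  have : (fun (st : Int × Int) (j : Int) =>
            stepP el ws st (j, PySem.List.pyGetD ws j "")) =
         (fun st (j : Int) =>
            if el <+: ws.drop j.toNat then (j, j + (el.length : Int) - 1) else st) := by
    funext st j; rfl
  rw [this]
  exact foldl_stepP_range el ws d ws.length

theorem goB_eq_lastHit (el ws : List String) :
    ∀ k, goB el ws k = lastHit el ws k := by
  intro k
  induction k with
  | zero => rfl
  | succ k ih =>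
    unfold goB lastHit
    rw [PySem.List.slice_natCast_add, ih]
    by_cases hp : el <+: ws.drop k
    · rw [if_pos hp, if_pos (by
        rw [List.prefix_iff_eq_take] at hp
        exact hp.symm)]
    · rw [if_neg hp, if_neg (by
        intro h
        exact hp (by rw [List.prefix_iff_eq_take, h]))]

theorem no_hit_high (el ws : List String) (hel : el ≠ []) :
    ∀ s, ws.length + 1 - el.length ≤ s → ¬ el <+: ws.drop s := by
  intro s hs h
  have h0 : 0 < el.length := List.length_pos_of_ne_nil hel
  have hlen := h.length_le
  rw [List.length_drop] at hlen
  omega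

theorem lastHit_shrink (el ws : List String) (hel : el ≠ []) :
    ∀ n, ws.length + 1 - el.length ≤ n →
      lastHit el ws n = lastHit el ws (ws.length + 1 - el.length) := by
  intro n
  induction n with
  | zero =>
    intro h
    have hz : ws.length + 1 - el.length = 0 := by omega
    rw [hz]
  | succ n ih =>
    intro h
    by_cases he : ws.length + 1 - el.length = n + 1
    · rw [he]
    · have hle : ws.length + 1 - el.length ≤ n := by omega
      rw [show lastHit el ws (n + 1) =
            if el <+: ws.drop n then some n else lastHit el ws n from rfl]
      rw [if_neg (no_hit_high el ws hel n (by omega)), ih hle]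

theorem findLast_eq (el ws : List String) (hel : el ≠ []) :
    findLast el ws = lastHit el ws ws.length := by
  unfold findLast
  rw [if_neg (by simpa using hel), goB_eq_lastHit]
  have h0 : 0 < el.length := List.length_pos_of_ne_nil hel
  by_cases hc : ws.length + 1 - el.length ≤ ws.length
  · rw [lastHit_shrink el ws hel ws.length hc]
  · have : el.length = 0 := by omega
    omega

theorem findLast_nil (el : List String) : findLast el [] = none := by
  unfold findLast
  by_cases h : el.isEmpty
  · rw [if_pos h]
  · rw [if_neg h]
    have h0 : 0 < el.length := by
      cases el with
      | nil => simp at h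
      | cons a t => simp
    have hz : ([] : List String).length + 1 - el.length = 0 := by
      simp only [List.length_nil]; omega
    rw [hz]
    rfl

-- ===== VERDICT (by name: the statement is the Claim_ definition above) =====
theorem get_entity_position_spec : Claim_equal_get_entity_position := by
  intro entity1 entity2 words _ hpre
  unfold Spec_get_entity_position
  rcases hpre with hnil | ⟨h1, h2⟩
  · subst hnil
    simp [get_entity_position, get_entity_position_alt, PySem.List.enumerate, findLast_nil]
  · simp only [get_entity_position, get_entity_position_alt]
    rw [show (fun (st : (Int × Int) × (Int × Int)) (iw : Int × String) =>
      (if PySem.List.pyGet? (PySem.Str.split₀ entity1) 0 = some iw.2 then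
         if whileA (PySem.Str.split₀ entity1) words iw.1 1 = (PySem.Str.split₀ entity1).length then
           (iw.1, iw.1 + ((whileA (PySem.Str.split₀ entity1) words iw.1 1 : Nat) : Int) - 1)
         else st.1
       else st.1,
       if PySem.List.pyGet? (PySem.Str.split₀ entity2) 0 = some iw.2 then
         if whileA (PySem.Str.split₀ entity2) words iw.1 1 = (PySem.Str.split₀ entity2).length then
           (iw.1, iw.1 + ((whileA (PySem.Str.split₀ entity2) words iw.1 1 : Nat) : Int) - 1)
         else st.2
       else st.2)) =
      (fun (st : (Int × Int) × (Int × Int)) (iw : Int × String) =>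
        (stepE (PySem.Str.split₀ entity1) words st.1 iw,
         stepE (PySem.Str.split₀ entity2) words st.2 iw)) from rfl]
    rw [foldl_pair, foldl_stepE _ _ h1, foldl_stepE _ _ h2,
        findLast_eq _ _ h1, findLast_eq _ _ h2]
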